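-- pv_equiv track=rewrite | github.com/SDET-SOLOMAN/code_wars_python | kata_6s/find_added.py | find_added
-- ===== SOURCE A (Python) =====
-- def find_added(st1, st2):
--     num1, num2 = st1, st2
--     st1 = {k: (num1.count(k)) for k in num1}
--     st2 = {k: (num2.count(k)) for k in num2}
--     re = ""
--     for k, v in st2.items():
--         if k not in st1:
--             re += k * v
--         elif st1[k] < v:
--             re += k * (v - st1[k])
--     return "".join(map(str, sorted([int(x) for x in re])))
-- ===== SOURCE B (Python) =====
-- def find_added(st1, st2):
--     # single consumption pass: count st1's chars once, then stream st2,
--     # consuming availability; leftovers are the added characters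
--     avail = {}
--     for c in st1:
--         avail[c] = avail.get(c, 0) + 1
--     extra = []
--     for c in st2:
--         if avail.get(c, 0) > 0:
--             avail[c] -= 1
--         else:
--             extra.append(c)
--     return "".join(map(str, sorted(int(c) for c in extra)))
-- ===== Notes on version B (the rewrite author's own statement) =====
-- stated objective: faster
-- what changed: Replaces the two count-dictionary comprehensions (each calling str.count per character) and the per-key comparison loop with a single consumption pass: st1's counts are built once, then st2 is streamed, consuming availability, and the leftover characters are exactly the added ones.
import Mathlib
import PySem

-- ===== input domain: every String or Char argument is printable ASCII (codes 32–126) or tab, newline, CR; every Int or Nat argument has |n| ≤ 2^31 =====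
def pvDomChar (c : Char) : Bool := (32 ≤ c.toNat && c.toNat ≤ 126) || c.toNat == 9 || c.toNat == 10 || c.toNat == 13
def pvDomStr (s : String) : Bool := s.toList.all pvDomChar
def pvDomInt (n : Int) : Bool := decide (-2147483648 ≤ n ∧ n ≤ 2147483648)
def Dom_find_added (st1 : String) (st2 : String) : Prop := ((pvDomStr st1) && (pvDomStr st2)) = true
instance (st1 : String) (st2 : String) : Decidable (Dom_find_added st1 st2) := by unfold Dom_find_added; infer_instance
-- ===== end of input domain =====

-- B replaces A's two count-dictionaries and per-key comparison loop with a single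
-- consumption pass over st2 (simpler decomposition; same results).


-- ===== PORT A =====
-- int(x) on the one-char string x: PySem.Int.ofChars? [x]; none (ValueError) is excluded
-- by Pre_find_added, so the port totalizes it with .getD 0 there (never reached inside Pre_).
def pvIntOfChar (x : Char) : Int := (PySem.Int.ofChars? [x]).getD 0

def find_added (st1 : String) (st2 : String) : String :=
  let num1 := st1.toList
  let num2 := st2.toList
  -- st1 = {k: num1.count(k) for k in num1}; num1.count(k) for a 1-char k is the char count (exact)
  let d1 : PySem.Dict Char Int :=
    num1.foldl (fun d k => d.insert k (num1.count k : Int)) PySem.Dict.empty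
  let d2 : PySem.Dict Char Int :=
    num2.foldl (fun d k => d.insert k (num2.count k : Int)) PySem.Dict.empty
  let re : List Char :=
    d2.items.foldl (fun re kv =>
      if d1.contains kv.1 = false then re ++ PySem.List.pyRepeat [kv.1] kv.2
      else if d1.getD kv.1 0 < kv.2 then re ++ PySem.List.pyRepeat [kv.1] (kv.2 - d1.getD kv.1 0)
      else re) []
  PySem.Str.join "" ((PySem.List.sorted (re.map pvIntOfChar) (fun x => x)).map PySem.Int.toStr)

-- ===== PORT B =====
def find_added_alt (st1 : String) (st2 : String) : String :=
  let avail : PySem.Dict Char Int :=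
    st1.toList.foldl (fun d c => d.insert c (d.getD c 0 + 1)) PySem.Dict.empty
  let s :=
    st2.toList.foldl (fun s c =>
      if s.1.getD c 0 > 0 then (s.1.insert c (s.1.getD c 0 - 1), s.2)
      else (s.1, s.2 ++ [c])) (avail, ([] : List Char))
  PySem.Str.join "" ((PySem.List.sorted (s.2.map pvIntOfChar) (fun x => x)).map PySem.Int.toStr)

-- ===== PRECONDITION & SPEC =====
-- Pre_ excludes exactly the inputs where A raises ValueError: some character occurs more
-- often in st2 than in st1 but is not a decimal digit, so int(x) on it raises.
def Pre_find_added (st1 : String) (st2 : String) : Prop :=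
  (st2.toList.all (fun c =>
    !(decide (st1.toList.count c < st2.toList.count c)) || (48 ≤ c.toNat && c.toNat ≤ 57))) = true
instance (st1 : String) (st2 : String) : Decidable (Pre_find_added st1 st2) := by
  unfold Pre_find_added; infer_instance
def pvWitness_find_added : String × String := ("a", "a1")

def Spec_find_added (st1 : String) (st2 : String) (out : String) : Prop := out = find_added_alt st1 st2
instance (st1 : String) (st2 : String) (out : String) : Decidable (Spec_find_added st1 st2 out) := by unfold Spec_find_added; infer_instance

-- ===== CLAIM (what is proved, stated in full; the proofs are below) =====
def Claim_equal_find_added : Prop := ∀ (st1 : String) (st2 : String), Dom_find_added st1 st2 → Pre_find_added st1 st2 → Spec_find_added st1 st2 (find_added st1 st2)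

-- ===== LEMMAS AND PROOFS =====

-- A's dict comprehension: lookup in a "insert f k for k in l" fold
lemma getD_foldl_insert_fn (f : Char → Int) (l : List Char) (d : PySem.Dict Char Int) (v : Char) :
    (l.foldl (fun d k => d.insert k (f k)) d).getD v 0 = if v ∈ l then f v else d.getD v 0 := by
  induction l generalizing d with
  | nil => simp
  | cons k t ih =>
    simp only [List.foldl_cons, ih, PySem.Dict.getD_insert, List.mem_cons]
    by_cases hv : v ∈ t
    · simp [hv]
    · by_cases he : v = k <;> simp [he, hv]

lemma contains_foldl_insert_fn (f : Char → Int) (l : List Char) (v : Char) :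
    (l.foldl (fun d k => d.insert k (f k)) PySem.Dict.empty).contains v = decide (v ∈ l) := by
  rw [PySem.Dict.contains_eq_decide_mem_keys, PySem.Dict.keys_foldl_insert]
  simp [PySem.Dict.keys_empty, ← PySem.Set.ofList_eq_foldl, PySem.Set.mem_ofList,
    PySem.Set.update]

lemma nodup_keys_foldl_insert_fn (f : Char → Int) (l : List Char) :
    (l.foldl (fun d k => d.insert k (f k)) PySem.Dict.empty).keys.Nodup :=
  PySem.Dict.nodup_keys_foldl_insert l (fun _ k => f k) PySem.Dict.empty
    (by simp [PySem.Dict.keys_empty])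

-- sum over a Nodup list of a function vanishing off c
lemma sum_map_single (c : Char) (h : Char → Nat) (ks : List Char) (hnd : ks.Nodup)
    (h0 : ∀ k ∈ ks, k ≠ c → h k = 0) :
    (ks.map h).sum = if c ∈ ks then h c else 0 := by
  induction ks with
  | nil => simp
  | cons k t ih =>
    simp only [List.map_cons, List.sum_cons, List.mem_cons]
    rcases List.nodup_cons.mp hnd with ⟨hk, hnt⟩
    by_cases he : k = c
    · subst he
      have : (t.map h).sum = 0 := by
        apply List.sum_eq_zero; intro x hx
        rcases List.mem_map.mp hx with ⟨y, hy, rfl⟩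
        exact h0 y (by simp [hy]) (fun hyc => hk (hyc ▸ hy))
      simp [this]
    · rw [h0 k (by simp) he, ih hnt (fun y hy => h0 y (by simp [hy]))]
      simp [Ne.symm he]

-- count of each char in A's "re" string
lemma countA (st1 st2 : String) (c : Char) :
    (((st2.toList.foldl (fun d k => d.insert k (st2.toList.count k : Int)) PySem.Dict.empty).items).foldl
      (fun re kv =>
        if (st1.toList.foldl (fun d k => d.insert k (st1.toList.count k : Int)) PySem.Dict.empty).contains kv.1 = false then
          re ++ PySem.List.pyRepeat [kv.1] kv.2
        else if (st1.toList.foldl (fun d k => d.insert k (st1.toList.count k : Int)) PySem.Dict.empty).getD kv.1 0 < kv.2 then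
          re ++ PySem.List.pyRepeat [kv.1] (kv.2 - (st1.toList.foldl (fun d k => d.insert k (st1.toList.count k : Int)) PySem.Dict.empty).getD kv.1 0)
        else re) ([] : List Char)).count c
    = st2.toList.count c - st1.toList.count c := by
  set n1 := st1.toList
  set n2 := st2.toList
  set d1 := n1.foldl (fun d k => d.insert k (n1.count k : Int)) PySem.Dict.empty with hd1
  set d2 := n2.foldl (fun d k => d.insert k (n2.count k : Int)) PySem.Dict.empty with hd2
  set g : Char × Int → List Char := fun kv =>
    if d1.contains kv.1 = false then PySem.List.pyRepeat [kv.1] kv.2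
    else if d1.getD kv.1 0 < kv.2 then PySem.List.pyRepeat [kv.1] (kv.2 - d1.getD kv.1 0)
    else [] with hg
  have hbody : d2.items.foldl
      (fun re kv =>
        if d1.contains kv.1 = false then re ++ PySem.List.pyRepeat [kv.1] kv.2
        else if d1.getD kv.1 0 < kv.2 then re ++ PySem.List.pyRepeat [kv.1] (kv.2 - d1.getD kv.1 0)
        else re) ([] : List Char)
      = d2.items.foldl (fun re kv => re ++ g kv) [] := by
    apply PySem.List.foldl_congr_mem
    intro acc kv _
    simp only [hg]
    split_ifs <;> simp
  rw [hbody, PySem.List.foldl_append_eq_flatMap, List.nil_append]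
  have hnd2 : d2.keys.Nodup := nodup_keys_foldl_insert_fn _ n2
  have hitems : d2.items = d2.keys.map (fun k => (k, d2.getD k 0)) :=
    PySem.Dict.items_eq_map_keys d2 hnd2 0
  have hmemk : ∀ v, v ∈ d2.keys ↔ v ∈ n2 := by
    intro v
    have := contains_foldl_insert_fn (fun k => (n2.count k : Int)) n2 v
    rw [PySem.Dict.contains_eq_decide_mem_keys] at this
    simpa using this
  have hgetD2 : ∀ v ∈ n2, d2.getD v 0 = (n2.count v : Int) := by
    intro v hv; rw [hd2, getD_foldl_insert_fn]; simp [hv]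
  have hgcount : ∀ k ∈ d2.keys, (g (k, d2.getD k 0)).count c = if k = c then n2.count c - n1.count c else 0 := by
    intro k hk
    have hk2 : k ∈ n2 := (hmemk k).mp hk
    have hv : d2.getD k 0 = (n2.count k : Int) := hgetD2 k hk2
    have hcont : d1.contains k = decide (k ∈ n1) := contains_foldl_insert_fn _ n1 k
    have hget1 : d1.getD k 0 = if k ∈ n1 then (n1.count k : Int) else 0 := by
      rw [hd1, getD_foldl_insert_fn]; simp
    by_cases h1 : k ∈ n1
    · have e1 : d1.contains k = true := by rw [hcont]; simp [h1]
      have e0 : d1.getD k 0 = (n1.count k : Int) := by rw [hget1, if_pos h1]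
      simp only [hg, hv, e1, e0, PySem.List.pyRepeat_singleton]
      rw [if_neg (show ¬ (true = false) by simp)]
      by_cases hc : k = c
      · subst hc
        split_ifs with hlt <;>
          simp only [List.count_replicate_self, List.count_nil] <;>
          first | omega | simp_all
      · split_ifs with hlt <;> simp [List.count_replicate, hc]
    · have e1 : d1.contains k = false := by rw [hcont]; simp [h1]
      have hc1 : n1.count k = 0 := List.count_eq_zero.mpr h1
      simp only [hg, hv, e1, PySem.List.pyRepeat_singleton]
      rw [if_pos trivial]
      by_cases hc : k = c
      · subst hc; simp [hc1]
      · simp [List.count_replicate, hc]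
  rw [hitems, List.flatMap_map, List.count_flatMap]
  rw [show (List.count c ∘ fun a => g (a, d2.getD a 0)) = fun k => List.count c (g (k, d2.getD k 0)) from rfl]
  rw [sum_map_single c _ _ hnd2 (fun k hk hkc => by rw [hgcount k hk]; simp [hkc])]
  by_cases hc2 : c ∈ d2.keys
  · rw [if_pos hc2, hgcount c hc2, if_pos rfl]
  · rw [if_neg hc2]
    have : c ∉ n2 := fun h => hc2 ((hmemk c).mpr h)
    have := List.count_eq_zero.mpr this
    omega

-- B's consumption pass, counted
lemma consume_count (l : List Char) (d : PySem.Dict Char Int) (acc : List Char) (c : Char)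
    (h : 0 ≤ d.getD c 0) :
    ((l.foldl (fun s c =>
        if s.1.getD c 0 > 0 then (s.1.insert c (s.1.getD c 0 - 1), s.2)
        else (s.1, s.2 ++ [c])) (d, acc)).2).count c
    = acc.count c + (l.count c - (d.getD c 0).toNat) := by
  induction l generalizing d acc with
  | nil => simp
  | cons x t ih =>
    simp only [List.foldl_cons]
    by_cases hx : d.getD x 0 > 0
    · rw [if_pos hx]
      by_cases hc : c = x
      · subst hc
        rw [ih (d.insert c (d.getD c 0 - 1)) acc
          (by rw [PySem.Dict.getD_insert_self]; omega)]
        rw [PySem.Dict.getD_insert_self]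
        simp
        omega
      · rw [ih (d.insert x (d.getD x 0 - 1)) acc
          (by rw [PySem.Dict.getD_insert_of_ne _ _ _ hc]; exact h)]
        rw [PySem.Dict.getD_insert_of_ne _ _ _ hc]
        have hxc : x ≠ c := fun h => hc h.symm
        simp [hxc]
    · rw [if_neg hx]
      by_cases hc : c = x
      · subst hc
        have h0 : d.getD c 0 = 0 := le_antisymm (not_lt.mp hx) h
        rw [ih d (acc ++ [c]) h]
        simp [h0]
        omega
      · rw [ih d (acc ++ [x]) h]
        have hxc : x ≠ c := fun h => hc h.symm
        simp [hxc]

-- count of each char in B's "extra" list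
lemma countB (st1 st2 : String) (c : Char) :
    ((st2.toList.foldl (fun s c =>
        if s.1.getD c 0 > 0 then (s.1.insert c (s.1.getD c 0 - 1), s.2)
        else (s.1, s.2 ++ [c]))
        (st1.toList.foldl (fun d c => d.insert c (d.getD c 0 + 1))
          (PySem.Dict.empty : PySem.Dict Char Int),
         ([] : List Char))).2).count c
    = st2.toList.count c - st1.toList.count c := by
  have havail : (st1.toList.foldl (fun d c => d.insert c (d.getD c 0 + 1))
      (PySem.Dict.empty : PySem.Dict Char Int)).getD c 0 = (st1.toList.count c : Int) := by
    rw [PySem.Dict.getD_foldl_insert_add_one]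
    simp [PySem.Dict.getD_empty]
  have hc0 : (0 : Int) ≤ (st1.toList.foldl (fun d c => d.insert c (d.getD c 0 + 1))
      (PySem.Dict.empty : PySem.Dict Char Int)).getD c 0 := by
    rw [havail]; positivity
  have h2 := consume_count st2.toList _ [] c hc0
  rw [havail] at h2
  simpa using h2

-- ===== VERDICT (by name: the statement is the Claim_ definition above) =====
theorem find_added_spec : Claim_equal_find_added := by
  intro st1 st2 _ _
  unfold Spec_find_added find_added find_added_alt
  simp only []
  congr 1
  apply congrArg (List.map PySem.Int.toStr)
  apply PySem.List.sorted_eq_sorted_of_perm _ _ _ (fun a b h => h)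
  apply List.Perm.map
  rw [List.perm_iff_count]
  intro c
  rw [countA st1 st2 c]
  exact (countB st1 st2 c).symm
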